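-- pv_equiv track=rewrite | github.com/saeidp/Basics | Heap/ConvertMaxHeapToMinHeap.py | convertMax
-- ===== SOURCE A (Python) =====
-- class Heap:
--     def maxHeapify(self, heaplist, index, heapSize):
--         largest = index
--         while(largest < heapSize // 2):
--             left = 2 * index + 1
--             right = 2 * index + 2
--             if left < heapSize and heaplist[left] > heaplist[index]:
--                 largest = left
--             if right < heapSize and heaplist[right] > heaplist[largest]:
--                 largest = right
--             if largest != index:
--                 heaplist[index],heaplist[largest] = heaplist[largest], heaplist[index]
--                 index = largest
--             else:
--                 break
--
--     def BuildMaxHeap(self, heaplist, heapSize):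
--         for i in range((heapSize - 1)//2, -1, -1):
--             self.maxHeapify(heaplist, i, heapSize)
--     def minHeapify(self, heapList, index, heapSize):
--         smallest = index
--         while smallest < heapSize // 2:
--             left = 2 * index + 1
--             right = 2 * index + 2
--             if left < heapSize and heapList[left] < heapList[index]:
--                 smallest = left
--             if right < heapSize and heapList[right] < heapList[smallest]:
--                 smallest = right
--             if smallest != index:
--                 heapList[index], heapList[smallest] = heapList[smallest], heapList[index]
--                 index = smallest
--             else:
--                 break
--     def BuildMinHeap(self, heaplist, heapSize):
--         for i in range((heapSize - 1)//2, -1, -1):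
--             self.minHeapify(heaplist, i, heapSize)
--
-- def convertMax(maxHeap):
--     result ="["
--     h = Heap()
--     h.BuildMinHeap(maxHeap, len(maxHeap))
--     for i in range(len(maxHeap)):
--         if i == len(maxHeap) - 1:
--             result += str(maxHeap[i])
--         else:
--             result += str(maxHeap[i]) + ","
--     result += "]"
--     return result
-- ===== SOURCE B (Python) =====
-- def convertMax(maxHeap):
--     # mutates maxHeap in place like A; recursive heapify instead of A's while loop
--     def minHeapify(arr, i, n):
--         left = 2 * i + 1
--         right = 2 * i + 2
--         smallest = i
--         if left < n and arr[left] < arr[i]: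
--             smallest = left
--         if right < n and arr[right] < arr[smallest]:
--             smallest = right
--         if smallest != i:
--             arr[i], arr[smallest] = arr[smallest], arr[i]
--             minHeapify(arr, smallest, n)
--     n = len(maxHeap)
--     for i in range((n - 1) // 2, -1, -1):
--         minHeapify(maxHeap, i, n)
--     return "[" + ",".join(str(x) for x in maxHeap) + "]"
-- ===== Notes on version B (the rewrite author's own statement) =====
-- stated objective: simpler
-- what changed: Replaces A's iterative sift-down loop (with the extra 'smallest < heapSize//2' guard and break) by the textbook recursive minHeapify, drops the unused Heap class and max-heap helpers, and formats the result with ','.join instead of an index loop with a last-element test.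
import Mathlib
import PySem

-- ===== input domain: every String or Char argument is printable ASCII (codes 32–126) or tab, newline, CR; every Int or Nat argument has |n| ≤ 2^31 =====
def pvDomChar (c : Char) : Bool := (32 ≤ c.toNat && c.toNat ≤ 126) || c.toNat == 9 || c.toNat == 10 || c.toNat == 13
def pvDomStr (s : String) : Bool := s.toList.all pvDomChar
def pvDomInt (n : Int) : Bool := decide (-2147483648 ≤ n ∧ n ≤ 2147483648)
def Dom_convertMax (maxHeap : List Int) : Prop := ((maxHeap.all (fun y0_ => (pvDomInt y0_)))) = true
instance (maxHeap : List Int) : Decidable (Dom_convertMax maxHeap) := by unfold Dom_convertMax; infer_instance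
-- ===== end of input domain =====

-- B replaces A's iterative sift-down by the textbook recursive minHeapify and formats
-- with ','.join; return-value equivalence only (both Pythons mutate the argument alike).

-- ===== PORT A =====
-- swap of two positions (Python tuple assignment heaplist[i], heaplist[j] = heaplist[j], heaplist[i])
def pvSwap (l : List Int) (i j : Nat) : List Int :=
  (l.set i (l.getD j 0)).set j (l.getD i 0)

-- A's while-loop minHeapify: at each loop head smallest = index, so the loop is
-- recursion on index with the 'index < n/2' test up front (faithful to the while).
def aMinHeapify (l : List Int) (index : Nat) (n : Nat) : List Int :=
  if _h : index < n / 2 then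
    let left := 2 * index + 1
    let right := 2 * index + 2
    let s1 := if left < n ∧ l.getD left 0 < l.getD index 0 then left else index
    let s2 := if right < n ∧ l.getD right 0 < l.getD s1 0 then right else s1
    if _h2 : s2 ≠ index then
      aMinHeapify (pvSwap l index s2) s2 n
    else l
  else l
termination_by n - index
decreasing_by
  simp only [s2, s1] at _h2 ⊢
  split_ifs at _h2 ⊢ <;> omega

-- A's BuildMinHeap: for i in range((n-1)//2, -1, -1)
def aBuildLoop (l : List Int) (i : Nat) (n : Nat) : List Int :=
  let l' := aMinHeapify l i n
  if i = 0 then l' else aBuildLoop l' (i - 1) n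

def aBuild (l : List Int) (n : Nat) : List Int :=
  if n = 0 then l else aBuildLoop l ((n - 1) / 2) n

-- A's formatting loop: for i in range(len): append str(l[i]) and "," unless last
def aFormat (l : List Int) (i : Nat) (acc : String) : String :=
  if _h : i < l.length then
    if i = l.length - 1 then aFormat l (i + 1) (acc ++ PySem.Int.toStr (l.getD i 0))
    else aFormat l (i + 1) (acc ++ PySem.Int.toStr (l.getD i 0) ++ ",")
  else acc
termination_by l.length - i

def convertMax (maxHeap : List Int) : String :=
  let h := aBuild maxHeap maxHeap.length
  aFormat h 0 "[" ++ "]"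

-- ===== PORT B =====
-- textbook recursive sift-down
def bMinHeapify (arr : List Int) (i : Nat) (n : Nat) : List Int :=
  let left := 2 * i + 1
  let right := 2 * i + 2
  let smallest0 := if left < n ∧ arr.getD left 0 < arr.getD i 0 then left else i
  let smallest := if right < n ∧ arr.getD right 0 < arr.getD smallest0 0 then right else smallest0
  if _h : smallest ≠ i then
    bMinHeapify (pvSwap arr i smallest) smallest n
  else arr
termination_by n - i
decreasing_by
  simp only [smallest, smallest0] at _h ⊢
  split_ifs at _h ⊢ <;> omega

def bBuildLoop (arr : List Int) (i : Nat) (n : Nat) : List Int :=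
  let arr' := bMinHeapify arr i n
  if i = 0 then arr' else bBuildLoop arr' (i - 1) n

def convertMax_alt (maxHeap : List Int) : String :=
  let n := maxHeap.length
  let h := if n = 0 then maxHeap else bBuildLoop maxHeap ((n - 1) / 2) n
  "[" ++ PySem.Str.join "," (h.map PySem.Int.toStr) ++ "]"

-- ===== PRECONDITION & SPEC =====
def Spec_convertMax (maxHeap : List Int) (out : String) : Prop := out = convertMax_alt maxHeap
instance (maxHeap : List Int) (out : String) : Decidable (Spec_convertMax maxHeap out) := by unfold Spec_convertMax; infer_instance

-- ===== CLAIM (what is proved, stated in full; the proofs are below) =====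
def Claim_equal_convertMax : Prop := ∀ (maxHeap : List Int), Dom_convertMax maxHeap → Spec_convertMax maxHeap (convertMax maxHeap)

-- ===== LEMMAS AND PROOFS =====

lemma heapify_eq (l : List Int) (i n : Nat) : aMinHeapify l i n = bMinHeapify l i n := by
  rw [aMinHeapify, bMinHeapify]
  by_cases h : i < n / 2
  · simp only [h, dif_pos]
    by_cases h2 : (if 2*i+2 < n ∧ l.getD (2*i+2) 0 < l.getD (if 2*i+1 < n ∧ l.getD (2*i+1) 0 < l.getD i 0 then 2*i+1 else i) 0 then 2*i+2 else (if 2*i+1 < n ∧ l.getD (2*i+1) 0 < l.getD i 0 then 2*i+1 else i)) ≠ i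
    · rw [dif_pos h2, dif_pos h2]
      exact heapify_eq _ _ _
    · rw [dif_neg h2, dif_neg h2]
  · -- i ≥ n/2: both children out of range, B's smallest = i, both return l
    have hl : ¬ (2*i+1 < n) := by omega
    have hr : ¬ (2*i+2 < n) := by omega
    simp [h, hl, hr]
termination_by n - i
decreasing_by
  split_ifs at h2 ⊢ <;> omega

lemma build_eq (l : List Int) (i n : Nat) : aBuildLoop l i n = bBuildLoop l i n := by
  induction i using Nat.strong_induction_on generalizing l with
  | _ i ih =>
    rw [aBuildLoop, bBuildLoop, heapify_eq]
    by_cases h : i = 0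
    · simp [h]
    · simp only [h]
      exact ih (i - 1) (by omega) _

lemma strJoin_cons_cons (sep p q : String) (rest : List String) :
    PySem.Str.join sep (p :: q :: rest) = p ++ sep ++ PySem.Str.join sep (q :: rest) := by
  have h := PySem.Str.toList_join sep (p :: q :: rest)
  rw [List.map_cons, List.map_cons, PySem.Chars.join_cons_cons] at h
  apply String.toList_injective
  simp [h, PySem.Str.toList_join]

lemma strJoin_singleton (sep p : String) : PySem.Str.join sep [p] = p := by
  apply String.toList_injective
  simp [PySem.Str.toList_join, PySem.Chars.join_singleton]

lemma strJoin_nil (sep : String) : PySem.Str.join sep [] = "" := by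
  apply String.toList_injective
  simp [PySem.Str.toList_join, PySem.Chars.join_nil]

lemma format_drop (l : List Int) (i : Nat) (acc : String) (h : i < l.length) :
    aFormat l i acc = acc ++ PySem.Str.join "," ((l.drop i).map PySem.Int.toStr) := by
  rw [aFormat]
  have hdrop : l.drop i = l.getD i 0 :: l.drop (i + 1) := by
    rw [List.getD_eq_getElem l 0 h]
    exact (List.getElem_cons_drop h).symm
  by_cases hlast : i = l.length - 1
  · have hnil : l.drop (i + 1) = [] := by
      apply List.drop_eq_nil_of_le; omega
    rw [dif_pos h, if_pos hlast, aFormat, dif_neg (by omega)]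
    rw [hdrop, hnil, List.map_cons, List.map_nil, strJoin_singleton]
  · have hlt : i + 1 < l.length := by omega
    rw [dif_pos h, if_neg hlast, format_drop l (i + 1) _ hlt]
    have hne : l.drop (i + 1) ≠ [] := by
      simp [List.drop_eq_nil_iff]; omega
    obtain ⟨y, ys, hy⟩ := List.exists_cons_of_ne_nil hne
    rw [hdrop, hy]
    simp only [List.map_cons]
    rw [strJoin_cons_cons]
    simp [String.append_assoc]
termination_by l.length - i

lemma format_eq (l : List Int) :
    aFormat l 0 "[" ++ "]" = "[" ++ PySem.Str.join "," (l.map PySem.Int.toStr) ++ "]" := by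
  cases l with
  | nil =>
    rw [aFormat]
    simp [strJoin_nil]
  | cons x xs =>
    rw [format_drop _ 0 _ (by simp)]
    simp

-- ===== VERDICT (by name: the statement is the Claim_ definition above) =====
theorem convertMax_spec : Claim_equal_convertMax := by
  intro l _
  unfold Spec_convertMax convertMax convertMax_alt aBuild
  by_cases h : l.length = 0
  · simp only [h, if_pos]
    exact format_eq l
  · simp only [h]
    rw [build_eq]
    exact format_eq _
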